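-- pv_equiv track=rewrite | github.com/nikihowe/reward-hacking-paper | gameability.py | get_set_representation
-- ===== SOURCE A (Python) =====
-- def get_set_representation(ordering, relation):
--     list_of_sets = [{ordering[0]}]
--     for i, policy in enumerate(ordering[1:]):
--         if relation[i] == 0:
--             list_of_sets[-1].add(policy)
--         else:
--             assert relation[i] == 1
--             list_of_sets.append({policy})
--
--     return list_of_sets
-- ===== SOURCE B (Python) =====
-- def get_set_representation(ordering, relation):
--     n = len(ordering)
--     cuts = [0]
--     for i in range(n - 1):
--         r = relation[i]
--         assert r in (0, 1)
--         if r == 1: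
--             cuts.append(i + 1)
--     cuts.append(n)
--     return [set(ordering[a:b]) for a, b in zip(cuts, cuts[1:])]
-- ===== Notes on version B (the rewrite author's own statement) =====
-- stated objective: alternative
-- what changed: Instead of growing a list of sets element by element (mutating the last set or appending a new one), B first scans the relation flags to collect cut indices, then slices the ordering at those cut points and converts each contiguous slice to a set.
import Mathlib
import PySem

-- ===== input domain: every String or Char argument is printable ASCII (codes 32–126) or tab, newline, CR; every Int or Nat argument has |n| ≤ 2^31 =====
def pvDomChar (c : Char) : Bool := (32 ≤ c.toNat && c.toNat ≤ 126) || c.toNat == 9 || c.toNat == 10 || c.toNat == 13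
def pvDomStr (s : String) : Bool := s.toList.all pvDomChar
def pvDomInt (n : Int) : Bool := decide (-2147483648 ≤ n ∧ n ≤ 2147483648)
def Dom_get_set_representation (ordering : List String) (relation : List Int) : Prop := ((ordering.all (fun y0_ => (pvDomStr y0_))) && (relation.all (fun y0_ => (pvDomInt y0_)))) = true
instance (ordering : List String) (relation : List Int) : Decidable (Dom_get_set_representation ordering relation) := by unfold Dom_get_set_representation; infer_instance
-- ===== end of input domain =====

-- B groups the ordering by slicing it at the cut indices collected from the relation flags, instead of
-- A's element-by-element growth of a list of sets (mutate last set / append new set): same values, an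
-- alternative decomposition. Equivalence is about return values; A mutates nothing.

-- ===== PORT A =====
def get_set_representation (ordering : List String) (relation : List Int) : List (List String) :=
  (PySem.List.enumerate (PySem.List.slice ordering (some 1) none)).foldl
    (fun acc p =>
      if (PySem.List.pyGet? relation p.1).getD 0 == 0 then
        acc.dropLast ++ [PySem.Set.add (acc.getLast?.getD PySem.Set.empty) p.2]
      else
        acc ++ [PySem.Set.ofList [p.2]])
    [PySem.Set.ofList [(PySem.List.pyGet? ordering 0).getD ""]]

-- ===== PORT B =====
def get_set_representation_alt (ordering : List String) (relation : List Int) : List (List String) :=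
  let n : Int := ordering.length
  let cuts : List Int :=
    (PySem.List.pyRange 0 (n - 1) 1).foldl
      (fun cs i => if (PySem.List.pyGet? relation i).getD 0 == 1 then cs ++ [i + 1] else cs)
      [0]
  let cuts2 := cuts ++ [n]
  (cuts2.zip cuts2.tail).map
    (fun ab => PySem.Set.ofList (PySem.List.slice ordering (some ab.1) (some ab.2)))

-- ===== PRECONDITION & SPEC =====
-- Pre_ excludes exactly the inputs where A raises: empty ordering (IndexError at ordering[0]),
-- relation shorter than len(ordering)-1 (IndexError), or a relation flag outside {0,1} (AssertionError).
def Pre_get_set_representation (ordering : List String) (relation : List Int) : Prop :=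
  ordering ≠ [] ∧ ordering.length - 1 ≤ relation.length ∧
    (relation.take (ordering.length - 1)).all (fun r => r == 0 || r == 1) = true
instance (ordering : List String) (relation : List Int) : Decidable (Pre_get_set_representation ordering relation) := by unfold Pre_get_set_representation; infer_instance

def pvWitness_get_set_representation : List String × List Int := (["a", "b", "c"], [0, 1])

def Spec_get_set_representation (ordering : List String) (relation : List Int) (out : List (List String)) : Prop := out = get_set_representation_alt ordering relation
instance (ordering : List String) (relation : List Int) (out : List (List String)) : Decidable (Spec_get_set_representation ordering relation out) := by unfold Spec_get_set_representation; infer_instance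

-- ===== CLAIM (what is proved, stated in full; the proofs are below) =====
def Claim_equal_get_set_representation : Prop := ∀ (ordering : List String) (relation : List Int), Dom_get_set_representation ordering relation → Pre_get_set_representation ordering relation → Spec_get_set_representation ordering relation (get_set_representation ordering relation)

-- ===== LEMMAS AND PROOFS =====

-- Reference recursion both ports are reduced to: process the tail of the ordering left to right,
-- keeping the current group and the absolute index into relation.
def repIdx (relation : List Int) : List String → PySem.Set String → Int → List (List String)
  | [], cur, _ => [cur]
  | y :: ys, cur, k =>
    if (PySem.List.pyGet? relation k).getD 0 == 0 then
      repIdx relation ys (PySem.Set.add cur y) (k + 1)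
    else
      cur :: repIdx relation ys (PySem.Set.ofList [y]) (k + 1)

-- A's loop, generalized over the already-finished groups and the current index.
theorem lemA (relation : List Int) (tail : List String) :
    ∀ (k : Int) (done : List (List String)) (cur : PySem.Set String),
    (PySem.List.enumerate tail k).foldl
      (fun acc p =>
        if (PySem.List.pyGet? relation p.1).getD 0 == 0 then
          acc.dropLast ++ [PySem.Set.add (acc.getLast?.getD PySem.Set.empty) p.2]
        else
          acc ++ [PySem.Set.ofList [p.2]])
      (done ++ [cur]) = done ++ repIdx relation tail cur k := by
  induction tail with
  | nil => intro k done cur; simp [PySem.List.enumerate, repIdx]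
  | cons y ys ih =>
    intro k done cur
    have henum : PySem.List.enumerate (y :: ys) k = (k, y) :: PySem.List.enumerate ys (k + 1) := by
      simp [PySem.List.enumerate]
    rw [henum, List.foldl_cons]
    by_cases h : ((PySem.List.pyGet? relation k).getD 0 == 0) = true
    · simp only [h, if_pos]
      rw [List.dropLast_concat, List.getLast?_concat]
      simp only [Option.getD_some]
      rw [ih (k + 1) done (PySem.Set.add cur y)]
      simp [repIdx, h]
    · rw [if_neg h]
      rw [ih (k + 1) (done ++ [cur]) (PySem.Set.ofList [y])]
      simp [repIdx, h]

def marks (relation : List Int) (n k : Int) : List Int :=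
  ((PySem.List.pyRange k (n - 1) 1).filter
    (fun i => (PySem.List.pyGet? relation i).getD 0 == 1)).map (fun i => i + 1)

def segs (ordering : List String) (cs : List Int) : List (List String) :=
  (cs.zip cs.tail).map
    (fun ab => PySem.Set.ofList (PySem.List.slice ordering (some ab.1) (some ab.2)))

theorem segs_cons (ordering : List String) (a b : Int) (rest : List Int) :
    segs ordering (a :: b :: rest)
      = PySem.Set.ofList (PySem.List.slice ordering (some a) (some b)) :: segs ordering (b :: rest) := by
  simp [segs]

theorem ofList_concat {α : Type} [BEq α] (xs : List α) (y : α) :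
    PySem.Set.ofList (xs ++ [y]) = PySem.Set.add (PySem.Set.ofList xs) y := by
  rw [PySem.Set.ofList_eq_foldl, PySem.Set.ofList_eq_foldl, List.foldl_append]
  rfl

-- slice ordering a (k+2) appends ordering[k+1] to slice ordering a (k+1)   (a ≤ k+1 < length)
theorem slice_snoc (ordering : List String) (a j : Nat) (ha : a ≤ j) (hj : j < ordering.length) :
    PySem.List.slice ordering (some (a : Int)) (some ((j : Int) + 1))
      = PySem.List.slice ordering (some (a : Int)) (some (j : Int)) ++ [ordering[j]] := by
  have h1 : ((j : Int) + 1) = (((j + 1 : Nat)) : Int) := by push_cast; ring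
  rw [h1, PySem.List.slice_natCast, PySem.List.slice_natCast]
  have h2 : j + 1 - a = (j - a) + 1 := by omega
  rw [h2, List.take_add_one]
  have h3 : (ordering.drop a)[j - a]? = some ordering[j] := by
    rw [List.getElem?_drop]
    have : a + (j - a) = j := by omega
    rw [this, List.getElem?_eq_getElem hj]
  simp [h3]

theorem lemB (ordering : List String) (relation : List Int)
    (hv : ∀ j : Nat, j < ordering.length - 1 →
            (relation[j]?).getD 0 = 0 ∨ (relation[j]?).getD 0 = 1) :
    ∀ (m k a : Nat), a ≤ k → k + m + 1 = ordering.length →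
    segs ordering (((a : Nat) : Int) :: (marks relation (ordering.length : Int) (k : Int) ++ [(ordering.length : Int)]))
      = repIdx relation (ordering.drop (k + 1))
          (PySem.Set.ofList (PySem.List.slice ordering (some ((a : Nat) : Int)) (some ((k : Int) + 1)))) (k : Int) := by
  intro m
  induction m with
  | zero =>
    intro k a ha hk
    have hnil : PySem.List.pyRange (k : Int) ((ordering.length : Int) - 1) 1 = [] := by
      apply PySem.List.pyRange_one_eq_nil; omega
    have hdrop : ordering.drop (k + 1) = [] := by
      apply List.drop_eq_nil_of_le; omega
    rw [hdrop]
    simp only [marks, hnil, List.filter_nil, List.map_nil, List.nil_append]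
    rw [segs_cons]
    have hn : ((ordering.length : Int)) = (k : Int) + 1 := by omega
    rw [hn]
    simp [segs, repIdx]
  | succ m ih =>
    intro k a ha hk
    have hklen : (k : Int) < (ordering.length : Int) - 1 := by omega
    have hcons : PySem.List.pyRange (k : Int) ((ordering.length : Int) - 1) 1
        = (k : Int) :: PySem.List.pyRange ((k : Int) + 1) ((ordering.length : Int) - 1) 1 :=
      PySem.List.pyRange_one_cons hklen
    have hk1 : ((k : Int) + 1) = (((k + 1 : Nat)) : Int) := by push_cast; ring
    have hget : PySem.List.pyGet? relation (k : Int) = relation[k]? := PySem.List.pyGet?_natCast relation k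
    have hj : k < ordering.length := by omega
    have hj1 : k + 1 < ordering.length := by omega
    have hdropc : ordering.drop (k + 1) = ordering[k + 1] :: ordering.drop (k + 2) := by
      rw [List.drop_eq_getElem_cons hj1]
    rcases hv k (by omega) with h0 | h1
    · -- relation[k] = 0 : same group continues
      have hcondB : ((PySem.List.pyGet? relation (k : Int)).getD 0 == 1) = false := by
        rw [hget, h0]; rfl
      have hmarks : marks relation (ordering.length : Int) (k : Int)
          = marks relation (ordering.length : Int) ((k + 1 : Nat) : Int) := by
        unfold marks
        rw [hcons, List.filter_cons, hcondB, hk1]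
        simp
      rw [hmarks, ih (k + 1) a (by omega) (by omega)]
      rw [hdropc]
      simp only [repIdx]
      have hcondA : ((PySem.List.pyGet? relation (k : Int)).getD 0 == 0) = true := by
        rw [hget, h0]; rfl
      rw [if_pos hcondA]
      have hsl : PySem.List.slice ordering (some ((a : Nat) : Int)) (some (((k + 1 : Nat) : Int) + 1))
          = PySem.List.slice ordering (some ((a : Nat) : Int)) (some ((k : Int) + 1)) ++ [ordering[k + 1]] := by
        have := slice_snoc ordering a (k + 1) (by omega) hj1
        rw [hk1]; rw [this]
      rw [hsl, ofList_concat, hk1]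
    · -- relation[k] = 1 : a new group starts at k+1
      have hcondB : ((PySem.List.pyGet? relation (k : Int)).getD 0 == 1) = true := by
        rw [hget, h1]; rfl
      have hmarks : marks relation (ordering.length : Int) (k : Int)
          = ((k + 1 : Nat) : Int) :: marks relation (ordering.length : Int) ((k + 1 : Nat) : Int) := by
        unfold marks
        rw [hcons, List.filter_cons, hcondB, hk1]
        simp
      rw [hmarks]
      rw [List.cons_append, segs_cons]
      rw [ih (k + 1) (k + 1) (by omega) (by omega)]
      rw [hdropc]
      simp only [repIdx]
      rw [if_neg (by simp [hget, h1])]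
      have hsl : PySem.List.slice ordering (some ((k + 1 : Nat) : Int)) (some (((k + 1 : Nat) : Int) + 1))
          = [ordering[k + 1]] := by
        have := slice_snoc ordering (k + 1) (k + 1) (le_refl _) hj1
        rw [this]
        have : PySem.List.slice ordering (some ((k + 1 : Nat) : Int)) (some ((k + 1 : Nat) : Int)) = [] := by
          rw [PySem.List.slice_natCast]; simp
        rw [this, List.nil_append]
      rw [hsl, hk1]

theorem hv_of_pre (ordering : List String) (relation : List Int)
    (hpre : Pre_get_set_representation ordering relation) :
    ∀ j : Nat, j < ordering.length - 1 →
      (relation[j]?).getD 0 = 0 ∨ (relation[j]?).getD 0 = 1 := by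
  obtain ⟨-, hlen, hall⟩ := hpre
  intro j hjn
  have hjl : j < relation.length := by omega
  have hmem : relation[j] ∈ relation.take (ordering.length - 1) := by
    have hjt : j < (relation.take (ordering.length - 1)).length := by
      simp; omega
    simpa [List.getElem_take] using List.getElem_mem hjt
  have h := List.all_eq_true.mp hall _ hmem
  rw [List.getElem?_eq_getElem hjl]
  simp only [Option.getD_some]
  simp only [Bool.or_eq_true, beq_iff_eq] at h
  exact h

theorem altB (ordering : List String) (relation : List Int) :
    get_set_representation_alt ordering relation
      = segs ordering ((0 : Int) :: (marks relation (ordering.length : Int) (0 : Int) ++ [(ordering.length : Int)])) := by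
  simp only [get_set_representation_alt]
  rw [PySem.List.foldl_append_if
    (p := fun i => (PySem.List.pyGet? relation i).getD 0 == 1) (f := fun i => i + 1)]
  simp [segs, marks]

-- ===== VERDICT (by name: the statement is the Claim_ definition above) =====
theorem get_set_representation_spec : Claim_equal_get_set_representation := by
  intro ordering relation _hdom hpre
  obtain ⟨hne, hlen, hall⟩ := hpre
  obtain ⟨x, tail, rfl⟩ : ∃ x t, ordering = x :: t := by
    cases ordering with
    | nil => exact absurd rfl hne
    | cons x tail => exact ⟨x, tail, rfl⟩
  unfold Spec_get_set_representation
  have hv := hv_of_pre (x :: tail) relation ⟨hne, hlen, hall⟩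
  have hA : get_set_representation (x :: tail) relation
      = repIdx relation tail (PySem.Set.ofList [x]) 0 := by
    unfold get_set_representation
    rw [PySem.List.slice_from_one]
    have := lemA relation tail 0 [] (PySem.Set.ofList [x])
    simp only [List.nil_append] at this
    simpa [PySem.List.pyGet?_zero_cons] using this
  have hB : get_set_representation_alt (x :: tail) relation
      = repIdx relation tail (PySem.Set.ofList [x]) 0 := by
    rw [altB]
    have hL := lemB (x :: tail) relation hv tail.length 0 0 (le_refl 0) (by simp)
    simp only [Nat.cast_zero, zero_add, List.drop_succ_cons, List.drop_zero] at hL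
    rw [hL]
    have hsl : PySem.List.slice (x :: tail) (some (0 : Int)) (some (1 : Int)) = [x] := by
      rw [show (0 : Int) = ((0 : Nat) : Int) by norm_num,
          show (1 : Int) = ((1 : Nat) : Int) by norm_num, PySem.List.slice_natCast]
      simp
    rw [hsl]
  rw [hA, hB]
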